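-- pv_equiv track=rewrite | github.com/Ashiq-am/Data-Structures-Algorithm | 1.Python Algorithms/8.Bitwise Algorithms/2.Intermediate/34.Check if bits of a number has count of consecutive set bits in increasing order/Example 1.py | findContinuous1
-- ===== SOURCE A (Python) =====
-- def findContinuous1(n):
--
-- 	# store the bit-pattern of n into
-- 	# bit bitset- bp
-- 	bp = list(bin(n))
--
-- 	bits = len(bp)
--
-- 	# set prev_count = 0 and curr_count = 0.
-- 	prev_count = 0
-- 	curr_count = 0
--
-- 	i = 0
-- 	while (i < bits):
-- 		if (bp[i] == '1'):
--
-- 			# increment current count of continuous-1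
-- 			curr_count += 1
-- 			i += 1
--
-- 		# traverse all continuous-0
-- 		elif (bp[i - 1] == '0'):
-- 			i += 1
-- 			curr_count = 0
-- 			continue
--
-- 		# check prev_count and curr_count
-- 		# on encounter of first zero after
-- 		# continuous-1s
-- 		else:
-- 			if (curr_count < prev_count):
-- 				return 0
-- 			i += 1
-- 			prev_count = curr_count
-- 			curr_count = 0
--
-- 	# check for last sequence of continuous-1
-- 	if (prev_count > curr_count and (curr_count != 0)):
-- 		return 0
--
-- 	return 1
-- ===== SOURCE B (Python) =====
-- def findContinuous1(n):
--     # Collect the lengths of consecutive '1' runs in bin(n), then check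
--     # that the list of run lengths is non-decreasing.
--     runs = []
--     cur = 0
--     for c in bin(n):
--         if c == '1':
--             cur += 1
--         else:
--             if cur > 0:
--                 runs.append(cur)
--             cur = 0
--     if cur > 0:
--         runs.append(cur)
--     for a, b in zip(runs, runs[1:]):
--         if b < a:
--             return 0
--     return 1
-- ===== Notes on version B (the rewrite author's own statement) =====
-- stated objective: simpler
-- what changed: Replaces the index-based while loop with prev/curr counters and a negative-index lookback by a single pass that collects the lengths of the runs of consecutive set bits, followed by a separate adjacent-pair non-decreasing check.
import Mathlib
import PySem

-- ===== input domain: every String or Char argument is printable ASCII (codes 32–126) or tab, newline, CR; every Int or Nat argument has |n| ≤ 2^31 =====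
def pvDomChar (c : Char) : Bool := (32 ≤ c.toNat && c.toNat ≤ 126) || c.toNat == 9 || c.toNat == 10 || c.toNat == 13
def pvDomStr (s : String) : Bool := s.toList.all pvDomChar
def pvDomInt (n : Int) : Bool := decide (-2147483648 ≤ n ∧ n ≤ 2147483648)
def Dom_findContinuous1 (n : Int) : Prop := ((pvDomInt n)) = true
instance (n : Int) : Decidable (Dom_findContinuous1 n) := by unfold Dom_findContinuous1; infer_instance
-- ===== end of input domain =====

-- B replaces A's index-based while loop (prev/curr counters with a negative-index
-- lookback) by an explicit list of 1-run lengths plus a separate non-decreasing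
-- check over adjacent pairs; same cost, simpler decomposition.


-- ===== PORT A =====
-- the while loop of A: state (prev_count, curr_count), index i over bp;
-- bp[i] and bp[i-1] via pyGetD (every index A uses is in range: 0 ≤ i < bits,
-- and i-1 = -1 only at i = 0, where Python wraps to the last element — pyGetD does too)
def pvGoA (bp : List Char) (bits : Int) (prev_count curr_count : Int) (i : Int) : Int :=
  if h : i < bits then
    if PySem.List.pyGetD bp i ' ' = '1' then
      pvGoA bp bits prev_count (curr_count + 1) (i + 1)
    else if PySem.List.pyGetD bp (i - 1) ' ' = '0' then
      pvGoA bp bits prev_count 0 (i + 1)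
    else
      if curr_count < prev_count then 0
      else pvGoA bp bits curr_count 0 (i + 1)
  else
    if prev_count > curr_count ∧ curr_count ≠ 0 then 0 else 1
termination_by (bits - i).toNat
decreasing_by all_goals omega

def findContinuous1 (n : Int) : Int :=
  let bp := PySem.Int.toBinChars0b n   -- list(bin(n))
  let bits : Int := bp.length
  pvGoA bp bits 0 0 0

-- ===== PORT B =====
-- one pass over the chars of bin(n), collecting lengths of consecutive-'1' runs
def pvRunsB : List Char → Int → List Int
  | [], cur => if cur > 0 then [cur] else []
  | c :: cs, cur =>
    if c = '1' then pvRunsB cs (cur + 1)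
    else if cur > 0 then cur :: pvRunsB cs 0 else pvRunsB cs 0

-- the zip(runs, runs[1:]) adjacent-pair check
def pvNondec : List Int → Int
  | a :: b :: rest => if b < a then 0 else pvNondec (b :: rest)
  | _ => 1

def findContinuous1_alt (n : Int) : Int :=
  pvNondec (pvRunsB (PySem.Int.toBinChars0b n) 0)

-- ===== PRECONDITION & SPEC =====
def Spec_findContinuous1 (n : Int) (out : Int) : Prop := out = findContinuous1_alt n
instance (n : Int) (out : Int) : Decidable (Spec_findContinuous1 n out) := by unfold Spec_findContinuous1; infer_instance

-- ===== CLAIM (what is proved, stated in full; the proofs are below) =====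
def Claim_equal_findContinuous1 : Prop := ∀ (n : Int), Dom_findContinuous1 n → Spec_findContinuous1 n (findContinuous1 n)

-- ===== LEMMAS AND PROOFS =====

-- A's loop rephrased structurally: remaining chars, previous char, prev/curr counts
def pvLoopA : List Char → Char → Int → Int → Int
  | [], _, P, C => if P > C ∧ C ≠ 0 then 0 else 1
  | c :: cs, p, P, C =>
    if c = '1' then pvLoopA cs c P (C + 1)
    else if p = '0' then pvLoopA cs c P 0
    else if C < P then 0 else pvLoopA cs c C 0

-- the pair check with a pending previous run length
def pvChk : Int → List Int → Int
  | _, [] => 1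
  | P, r :: rest => if r < P then 0 else pvChk r rest

lemma pvGoA_eq_loopA (bp : List Char) (m : Nat) :
    ∀ (k : Nat) (P C : Int), m = bp.length - k → k ≤ bp.length →
    pvGoA bp bp.length P C k = pvLoopA (bp.drop k) (PySem.List.pyGetD bp ((k : Int) - 1) ' ') P C := by
  induction m with
  | zero =>
    intro k P C hm hk
    have hk' : k = bp.length := by omega
    subst hk'
    rw [pvGoA]
    simp [pvLoopA]
  | succ m ih =>
    intro k P C hm hk
    have hklt : k < bp.length := by omega
    have hdrop : bp.drop k = bp[k] :: bp.drop (k + 1) := List.drop_eq_getElem_cons hklt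
    have hget : PySem.List.pyGetD bp (k : Int) ' ' = bp[k] := PySem.List.pyGetD_ofNat bp k ' ' hklt
    have hcast : ((k : Int) + 1) = ((k + 1 : Nat) : Int) := by push_cast; ring
    have hget' : PySem.List.pyGetD bp (((k + 1 : Nat) : Int) - 1) ' ' = bp[k] := by
      rw [show (((k + 1 : Nat) : Int) - 1) = (k : Int) by push_cast; ring]; exact hget
    rw [pvGoA]
    rw [dif_pos (by exact_mod_cast hklt)]
    rw [hdrop, pvLoopA, hget]
    by_cases h1 : bp[k] = '1'
    · rw [if_pos h1, if_pos h1, hcast, ih (k + 1) P (C + 1) (by omega) (by omega), hget', h1]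
    · rw [if_neg h1, if_neg h1]
      by_cases h0 : PySem.List.pyGetD bp ((k : Int) - 1) ' ' = '0'
      · rw [if_pos h0, if_pos h0, hcast, ih (k + 1) P 0 (by omega) (by omega), hget']
      · rw [if_neg h0, if_neg h0]
        by_cases hcp : C < P
        · rw [if_pos hcp, if_pos hcp]
        · rw [if_neg hcp, if_neg hcp, hcast, ih (k + 1) C 0 (by omega) (by omega), hget']

lemma pvLoopA_eq_chk :
    ∀ (cs : List Char) (p : Char) (P C : Int),
    (∀ c ∈ cs, c = '0' ∨ c = '1') → 0 ≤ C → 0 ≤ P →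
    (p = '1' → 1 ≤ C) → (p ≠ '1' → C = 0) → (p ≠ '0' → p ≠ '1' → P = 0) →
    pvLoopA cs p P C = pvChk P (pvRunsB cs C) := by
  intro cs
  induction cs with
  | nil =>
    intro p P C _ hC hP _ _ _
    simp only [pvLoopA, pvRunsB]
    by_cases h : C = 0
    · subst h; simp [pvChk]
    · rw [if_pos (by omega : C > 0)]
      simp only [pvChk]
      by_cases hPC : C < P
      · rw [if_pos ⟨by omega, h⟩, if_pos hPC]
      · rw [if_neg (fun hh => hPC hh.1), if_neg hPC]
  | cons c cs ih =>
    intro p P C hbin hC hP h1 hn1 hn01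
    have hcsbin : ∀ x ∈ cs, x = '0' ∨ x = '1' := fun x hx => hbin x (List.mem_cons_of_mem _ hx)
    by_cases hc1 : c = '1'
    · subst hc1
      simp only [pvLoopA, pvRunsB, if_pos]
      exact ih '1' P (C + 1) hcsbin (by omega) hP (fun _ => by omega)
        (fun h => absurd rfl h) (fun _ h => absurd rfl h)
    · have hc0 : c = '0' := by
        rcases hbin c List.mem_cons_self with h | h
        · exact h
        · exact absurd h hc1
      subst hc0
      simp only [pvLoopA, pvRunsB, Char.reduceEq, if_false]
      by_cases hp0 : p = '0'
      · have hC0 : C = 0 := hn1 (by rw [hp0]; decide)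
        subst hC0
        rw [if_pos hp0, if_neg (by omega : ¬(0 : Int) > 0)]
        exact ih '0' P 0 hcsbin le_rfl hP (fun h => absurd h (by decide))
          (fun _ => rfl) (fun h _ => absurd rfl h)
      · rw [if_neg hp0]
        by_cases hCpos : 0 < C
        · rw [if_pos (by omega : C > 0)]
          simp only [pvChk]
          by_cases hlt : C < P
          · rw [if_pos hlt, if_pos hlt]
          · rw [if_neg hlt, if_neg hlt]
            exact ih '0' C 0 hcsbin le_rfl (by omega) (fun h => absurd h (by decide))
              (fun _ => rfl) (fun h _ => absurd rfl h)
        · have hC0 : C = 0 := by omega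
          subst hC0
          have hP0 : P = 0 := by
            by_cases hp1 : p = '1'
            · exact absurd (h1 hp1) (by omega)
            · exact hn01 hp0 hp1
          subst hP0
          rw [if_neg (by omega : ¬(0 : Int) < 0), if_neg (by omega : ¬(0 : Int) > 0)]
          exact ih '0' 0 0 hcsbin le_rfl le_rfl (fun h => absurd h (by decide))
            (fun _ => rfl) (fun h _ => absurd rfl h)

lemma pvChk_eq_nondec : ∀ (rest : List Int) (a : Int), pvChk a rest = pvNondec (a :: rest) := by
  intro rest
  induction rest with
  | nil => intro a; simp [pvChk, pvNondec]
  | cons b r ih =>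
    intro a
    rw [pvChk, pvNondec]
    by_cases h : b < a
    · rw [if_pos h, if_pos h]
    · rw [if_neg h, if_neg h, ih b]

lemma pvRunsB_pos : ∀ (cs : List Char) (C : Int), 0 ≤ C → ∀ r ∈ pvRunsB cs C, 1 ≤ r := by
  intro cs
  induction cs with
  | nil =>
    intro C hC r hr
    simp only [pvRunsB] at hr
    split at hr
    · simp at hr; omega
    · simp at hr
  | cons c cs ih =>
    intro C hC r hr
    simp only [pvRunsB] at hr
    split at hr
    · exact ih (C + 1) (by omega) r hr
    · split at hr
      · rcases List.mem_cons.mp hr with h | h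
        · omega
        · exact ih 0 le_rfl r h
      · exact ih 0 le_rfl r hr

lemma pvChk_zero_eq_nondec (rs : List Int) (h : ∀ r ∈ rs, 1 ≤ r) : pvChk 0 rs = pvNondec rs := by
  cases rs with
  | nil => rfl
  | cons a rest =>
    rw [pvChk, if_neg (by have := h a List.mem_cons_self; omega)]
    exact pvChk_eq_nondec rest a

-- binary digit lists from Nat.toDigits 2
lemma toDigitsCore_two_bin : ∀ (fuel n : Nat) (ds : List Char),
    (∀ c ∈ ds, c = '0' ∨ c = '1') → ∀ c ∈ Nat.toDigitsCore 2 fuel n ds, c = '0' ∨ c = '1' := by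
  intro fuel
  induction fuel with
  | zero => intro n ds hds; simpa [Nat.toDigitsCore] using hds
  | succ fuel ih =>
    intro n ds hds c hc
    have hd : (n % 2).digitChar = '0' ∨ (n % 2).digitChar = '1' := by
      have h2 : n % 2 = 0 ∨ n % 2 = 1 := by omega
      rcases h2 with h | h <;> simp [h, Nat.digitChar]
    simp only [Nat.toDigitsCore] at hc
    split at hc
    · rcases List.mem_cons.mp hc with h | h
      · subst h; exact hd
      · exact hds c h
    · refine ih (n / 2) _ ?_ c hc
      intro x hx
      rcases List.mem_cons.mp hx with h | h
      · subst h; exact hd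
      · exact hds x h

lemma toDigitsCore_two_ne_nil : ∀ (fuel n : Nat) (ds : List Char),
    fuel ≠ 0 ∨ ds ≠ [] → Nat.toDigitsCore 2 fuel n ds ≠ [] := by
  intro fuel
  induction fuel with
  | zero => intro n ds h; simp only [Nat.toDigitsCore]; tauto
  | succ fuel ih =>
    intro n ds _
    simp only [Nat.toDigitsCore]
    split
    · simp
    · exact ih (n / 2) _ (Or.inr (by simp))

lemma toDigits_two_bin (m : Nat) : ∀ c ∈ Nat.toDigits 2 m, c = '0' ∨ c = '1' :=
  toDigitsCore_two_bin (m + 1) m [] (by simp)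

lemma toDigits_two_ne_nil (m : Nat) : Nat.toDigits 2 m ≠ [] :=
  toDigitsCore_two_ne_nil (m + 1) m [] (Or.inl (by omega))

-- from the first digit onward, A's structural loop agrees with chk over the runs
lemma pvLoopA_digits (ds : List Char) (hbin : ∀ c ∈ ds, c = '0' ∨ c = '1') :
    pvLoopA ds 'b' 0 0 = pvChk 0 (pvRunsB ds 0) :=
  pvLoopA_eq_chk ds 'b' 0 0 hbin le_rfl le_rfl (by decide) (fun _ => rfl) (by decide)

-- the prefix steps of A's loop ("0b" or "-0b"), with p the last char of bp
lemma pvLoopA_prefix_pos (ds : List Char) (p : Char) (hp : p = '0' ∨ p = '1') :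
    pvLoopA ('0' :: 'b' :: ds) p 0 0 = pvLoopA ds 'b' 0 0 := by
  rcases hp with h | h <;> subst h <;> simp [pvLoopA]

lemma pvLoopA_prefix_neg (ds : List Char) (p : Char) (hp : p = '0' ∨ p = '1') :
    pvLoopA ('-' :: '0' :: 'b' :: ds) p 0 0 = pvLoopA ds 'b' 0 0 := by
  rcases hp with h | h <;> subst h <;> simp [pvLoopA]

lemma pvRunsB_skip (c : Char) (cs : List Char) (h : c ≠ '1') :
    pvRunsB (c :: cs) 0 = pvRunsB cs 0 := by
  rw [pvRunsB, if_neg h, if_neg (by omega)]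

lemma pv_main (pre ds : List Char) (hbin : ∀ c ∈ ds, c = '0' ∨ c = '1') (hds : ds ≠ [])
    (hpre : pre = ['0', 'b'] ∨ pre = ['-', '0', 'b']) :
    pvGoA (pre ++ ds) ((pre ++ ds).length : Int) 0 0 0 = pvNondec (pvRunsB (pre ++ ds) 0) := by
  have hne : pre ++ ds ≠ [] := by rcases hpre with h | h <;> subst h <;> simp
  have hlast : (pre ++ ds).getLast hne = '0' ∨ (pre ++ ds).getLast hne = '1' := by
    have : (pre ++ ds).getLast hne = ds.getLast hds := List.getLast_append_of_ne_nil hne hds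
    rw [this]; exact hbin _ (List.getLast_mem hds)
  have hb := pvGoA_eq_loopA (pre ++ ds) (pre ++ ds).length 0 0 0 (by omega) (by omega)
  simp only [Nat.cast_zero] at hb
  rw [hb]
  have hg : PySem.List.pyGetD (pre ++ ds) ((0 : Int) - 1) ' ' = (pre ++ ds).getLast hne := by
    rw [show ((0 : Int) - 1) = -1 by ring]; exact PySem.List.pyGetD_neg_one _ _ hne
  rw [List.drop_zero, hg]
  have hposruns : ∀ r ∈ pvRunsB ds 0, 1 ≤ r := pvRunsB_pos ds 0 le_rfl
  rcases hpre with h | h <;> subst h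
  · show pvLoopA ('0' :: 'b' :: ds) ((['0', 'b'] ++ ds).getLast hne) 0 0 =
      pvNondec (pvRunsB ('0' :: 'b' :: ds) 0)
    rw [pvLoopA_prefix_pos ds _ hlast, pvLoopA_digits ds hbin]
    rw [pvRunsB_skip '0' _ (by decide), pvRunsB_skip 'b' _ (by decide)]
    exact pvChk_zero_eq_nondec _ hposruns
  · show pvLoopA ('-' :: '0' :: 'b' :: ds) ((['-', '0', 'b'] ++ ds).getLast hne) 0 0 =
      pvNondec (pvRunsB ('-' :: '0' :: 'b' :: ds) 0)
    rw [pvLoopA_prefix_neg ds _ hlast, pvLoopA_digits ds hbin]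
    rw [pvRunsB_skip '-' _ (by decide), pvRunsB_skip '0' _ (by decide),
        pvRunsB_skip 'b' _ (by decide)]
    exact pvChk_zero_eq_nondec _ hposruns

-- ===== VERDICT (by name: the statement is the Claim_ definition above) =====
theorem findContinuous1_spec : Claim_equal_findContinuous1 := by
  intro n _
  unfold Spec_findContinuous1 findContinuous1 findContinuous1_alt
  by_cases hn : n < 0
  · have hbp : PySem.Int.toBinChars0b n = ['-', '0', 'b'] ++ Nat.toDigits 2 n.natAbs := by
      simp [PySem.Int.toBinChars0b, hn]
    rw [hbp]
    exact pv_main _ _ (toDigits_two_bin _) (toDigits_two_ne_nil _) (Or.inr rfl)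
  · have hbp : PySem.Int.toBinChars0b n = ['0', 'b'] ++ Nat.toDigits 2 n.toNat := by
      simp [PySem.Int.toBinChars0b, hn]
    rw [hbp]
    exact pv_main _ _ (toDigits_two_bin _) (toDigits_two_ne_nil _) (Or.inl rfl)
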